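-- pv_equiv track=rewrite | github.com/xys234/Work | SWIFT/DynusT_to_TRANSIMS/scripts/convert_demand.py | get_period_share
-- ===== SOURCE A (Python) =====
-- def get_period_share(period, tod_times, tod_shares):
--     """
--
--     :param period: a list of tuples specifying period start and end times
--     :param tod_times:
--     :param tod_shares:
--     :return:
--     """
--     share = []
--     times = []
--     for p in period:
--         for t, s in zip(tod_times, tod_shares):
--             if p[0] <= t < p[1]:
--                 share.append(s)
--                 times.append(t)
--     return share, times
-- ===== SOURCE B (Python) =====
-- def _bisect_left(xs, x):
--     lo, hi = 0, len(xs)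
--     while lo < hi:
--         mid = (lo + hi) // 2
--         if xs[mid] < x:
--             lo = mid + 1
--         else:
--             hi = mid
--     return lo
--
--
-- def get_period_share(period, tod_times, tod_shares):
--     n = min(len(tod_times), len(tod_shares))
--     order = sorted(range(n), key=lambda i: tod_times[i])
--     ts = [tod_times[i] for i in order]
--     share = []
--     times = []
--     for a, b in period:
--         for i in sorted(order[_bisect_left(ts, a):_bisect_left(ts, b)]):
--             share.append(tod_shares[i])
--             times.append(tod_times[i])
--     return share, times
-- ===== Notes on version B (the rewrite author's own statement) =====
-- stated objective: faster
-- what changed: Instead of scanning all times for every period, B sorts the time indices by time once, binary-searches each period's boundary positions in the sorted times, and re-sorts only the hit indices to restore the original emission order.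
import Mathlib
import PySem

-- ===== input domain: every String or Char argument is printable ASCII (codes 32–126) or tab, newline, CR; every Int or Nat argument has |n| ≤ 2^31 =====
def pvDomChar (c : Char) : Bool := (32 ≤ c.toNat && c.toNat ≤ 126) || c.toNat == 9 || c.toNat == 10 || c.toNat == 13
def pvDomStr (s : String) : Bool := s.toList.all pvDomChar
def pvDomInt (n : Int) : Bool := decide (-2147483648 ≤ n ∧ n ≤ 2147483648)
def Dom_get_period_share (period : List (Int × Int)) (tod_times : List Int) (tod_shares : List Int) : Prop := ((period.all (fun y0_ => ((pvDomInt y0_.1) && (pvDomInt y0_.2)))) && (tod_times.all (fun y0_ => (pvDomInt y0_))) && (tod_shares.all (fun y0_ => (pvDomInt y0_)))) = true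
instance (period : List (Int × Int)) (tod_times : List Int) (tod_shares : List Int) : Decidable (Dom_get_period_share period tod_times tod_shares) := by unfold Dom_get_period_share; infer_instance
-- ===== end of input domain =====

-- B replaces A's nested period×time scan by sorting the time indices once and binary-searching
-- each period's boundaries, re-sorting the hit indices to restore A's original emission order
-- (objective: faster per-period lookup; exact same return value, both functions are total).

-- ===== PORT A =====
-- literal transliteration of A: two accumulator lists, nested loops over period and zip(times, shares)
def get_period_share (period : List (Int × Int)) (tod_times : List Int) (tod_shares : List Int) : List Int × List Int :=
  period.foldl
    (fun st p =>
      (tod_times.zip tod_shares).foldl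
        (fun st ts =>
          if p.1 ≤ ts.1 ∧ ts.1 < p.2 then (st.1 ++ [ts.2], st.2 ++ [ts.1]) else st)
        st)
    (([], []) : List Int × List Int)

-- ===== PORT B =====
-- hand-written binary search from Source B (bisect_left's while loop), transliterated step for step;
-- list indexing xs[mid] is always in range (0 ≤ lo ≤ mid < hi ≤ len xs), so getD is exact
def pvBLgo (xs : List Int) (x : Int) (lo hi : Nat) : Nat :=
  if _h : lo < hi then
    let mid := (lo + hi) / 2
    if xs.getD mid 0 < x then pvBLgo xs x (mid + 1) hi
    else pvBLgo xs x lo mid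
  else lo
termination_by hi - lo
decreasing_by all_goals omega

def pvBisectLeft (xs : List Int) (x : Int) : Nat := pvBLgo xs x 0 xs.length

-- Source B: sort indices by time, binary-search each period's slice, re-sort the slice's indices;
-- tod_times[i] / tod_shares[i] always have 0 ≤ i < min(len), so pyGetD is exact
def get_period_share_alt (period : List (Int × Int)) (tod_times : List Int) (tod_shares : List Int) : List Int × List Int :=
  let n : Nat := min tod_times.length tod_shares.length
  let key : Int → Int := fun i => PySem.List.pyGetD tod_times i 0
  let order : List Int := PySem.List.sorted (PySem.List.pyRange 0 (n : Int)) key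
  let ts : List Int := order.map key
  period.foldl
    (fun st p =>
      (PySem.List.sorted
          (PySem.List.slice order (some ((pvBisectLeft ts p.1 : Nat) : Int))
            (some ((pvBisectLeft ts p.2 : Nat) : Int)))
          (fun i => i)).foldl
        (fun st i =>
          (st.1 ++ [PySem.List.pyGetD tod_shares i 0], st.2 ++ [PySem.List.pyGetD tod_times i 0]))
        st)
    (([], []) : List Int × List Int)

-- ===== PRECONDITION & SPEC =====
def Spec_get_period_share (period : List (Int × Int)) (tod_times : List Int) (tod_shares : List Int) (out : List Int × List Int) : Prop := out = get_period_share_alt period tod_times tod_shares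
instance (period : List (Int × Int)) (tod_times : List Int) (tod_shares : List Int) (out : List Int × List Int) : Decidable (Spec_get_period_share period tod_times tod_shares out) := by unfold Spec_get_period_share; infer_instance

-- ===== CLAIM (what is proved, stated in full; the proofs are below) =====
def Claim_equal_get_period_share : Prop := ∀ (period : List (Int × Int)) (tod_times : List Int) (tod_shares : List Int), Dom_get_period_share period tod_times tod_shares → Spec_get_period_share period tod_times tod_shares (get_period_share period tod_times tod_shares)

-- ===== LEMMAS AND PROOFS =====

-- correctness of the transliterated binary search on a nondecreasing list
lemma pvBLgo_spec (xs : List Int) (x : Int)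
    (hsort : List.Pairwise (· ≤ ·) xs) :
    ∀ (lo hi : Nat), lo ≤ hi → hi ≤ xs.length →
      (∀ j (hj : j < xs.length), j < lo → xs[j] < x) →
      (∀ j (hj : j < xs.length), hi ≤ j → x ≤ xs[j]) →
      pvBLgo xs x lo hi ≤ xs.length ∧
        (∀ j (hj : j < xs.length), j < pvBLgo xs x lo hi → xs[j] < x) ∧
        (∀ j (hj : j < xs.length), pvBLgo xs x lo hi ≤ j → x ≤ xs[j]) := by
  have hmono := List.pairwise_iff_getElem.1 hsort
  intro lo hi
  fun_induction pvBLgo xs x lo hi with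
  | case1 lo hi h mid hlt ih =>
    intro hlohi hhile h3 h4
    have hmid : mid < xs.length := by omega
    have hget : xs.getD mid 0 = xs[mid] := List.getD_eq_getElem xs 0 hmid
    refine ih (by omega) hhile ?_ h4
    intro j hj hjlt
    rcases Nat.lt_or_ge j mid with hc | hc
    · exact lt_of_le_of_lt (hmono j mid hj hmid hc) (by rwa [hget] at hlt)
    · have : j = mid := by omega
      subst this; rwa [hget] at hlt
  | case2 lo hi h mid hge ih =>
    intro hlohi hhile h3 h4
    have hmid : mid < xs.length := by omega
    have hget : xs.getD mid 0 = xs[mid] := List.getD_eq_getElem xs 0 hmid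
    have hxmid : x ≤ xs[mid] := by rw [← hget]; exact le_of_not_gt hge
    refine ih (by omega) (by omega) h3 ?_
    intro j hj hjge
    rcases Nat.lt_or_ge j mid with hc | hc
    · omega
    · rcases Nat.eq_or_lt_of_le hc with hc' | hc'
      · subst hc'; exact hxmid
      · exact le_trans hxmid (hmono mid j hmid hj hc')
  | case3 lo hi h =>
    intro hlohi hhile h3 h4
    have : lo = hi := by omega
    subst this
    exact ⟨hhile, h3, h4⟩

lemma pvBisectLeft_spec (xs : List Int) (x : Int)
    (hsort : List.Pairwise (· ≤ ·) xs) :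
    pvBisectLeft xs x ≤ xs.length ∧
      (∀ j (hj : j < xs.length), j < pvBisectLeft xs x → xs[j] < x) ∧
      (∀ j (hj : j < xs.length), pvBisectLeft xs x ≤ j → x ≤ xs[j]) := by
  unfold pvBisectLeft
  exact pvBLgo_spec xs x hsort 0 xs.length (Nat.zero_le _) le_rfl
    (by omega) (by intro j hj hji; omega)

-- a fold that appends to both components of a pair, where each step is a pure append
lemma foldl_pair_append {α β : Type} (F G : α → List β)
    (f : (List β × List β) → α → (List β × List β))
    (hf : ∀ st p, f st p = (st.1 ++ F p, st.2 ++ G p)) :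
    ∀ (l : List α) (acc : List β × List β),
      l.foldl f acc = (acc.1 ++ l.flatMap F, acc.2 ++ l.flatMap G) := by
  intro l
  induction l with
  | nil => intro acc; simp
  | cons p l ih =>
    intro acc
    simp only [List.foldl_cons, hf, ih, List.flatMap_cons, List.append_assoc]

-- a strictly increasing list of indices mapped through an element getter is a filter:
-- if idxs enumerates, in increasing order, exactly the positions of z satisfying P,
-- then reading z at those positions yields z.filter P
lemma map_idxs_eq_filter {α : Type} (P : α → Bool) :
    ∀ (z : List α) (idxs : List Int) (g : Int → α),
      idxs.Pairwise (· < ·) →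
      (∀ i : Int, i ∈ idxs ↔ ∃ k : Nat, i = (k : Int) ∧ ∃ _h : k < z.length, P z[k] = true) →
      (∀ (k : Nat) (_h : k < z.length), g (k : Int) = z[k]) →
      idxs.map g = z.filter P := by
  intro z
  induction z with
  | nil =>
    intro idxs g _ hmem _
    have : idxs = [] := by
      apply List.eq_nil_iff_forall_not_mem.2
      intro i hi
      rcases (hmem i).1 hi with ⟨k, _, hk, _⟩
      simp at hk
    simp [this]
  | cons a z ih =>
    intro idxs g hpw hmem hg
    have hga : g 0 = a := by
      have := hg 0 (by simp)
      simpa using this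
    by_cases hPa : P a = true
    · -- 0 is in idxs and is its head
      have h0 : (0 : Int) ∈ idxs := (hmem 0).2 ⟨0, rfl, by simp, by simpa⟩
      rcases idxs with _ | ⟨hd, t⟩
      · simp at h0
      · have hpc := List.pairwise_cons.1 hpw
        have hhd0 : hd = 0 := by
          rcases List.mem_cons.1 h0 with h | h
          · exact h.symm
          · exfalso
            have hlt : hd < 0 := hpc.1 0 h
            rcases (hmem hd).1 (by simp) with ⟨k, hk, _, _⟩
            omega
        subst hhd0
        have hpos : ∀ x ∈ t, 0 < x := hpc.1
        have ht : (t.map (· - 1)).map (fun i => g (i + 1)) = z.filter P := by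
          apply ih
          · rw [List.pairwise_map]
            exact hpc.2.imp (by intro a b hab; omega)
          · intro i
            constructor
            · intro hi
              rcases List.mem_map.1 hi with ⟨j, hj, hji⟩
              have hj1 : i + 1 ∈ t := by
                have : j = i + 1 := by omega
                rwa [this] at hj
              rcases (hmem (i + 1)).1 (List.mem_cons_of_mem _ hj1) with ⟨k, hk, hkl, hPk⟩
              have hkpos : 0 < k := by
                have := hpos _ hj1; omega
              obtain ⟨k', rfl⟩ : ∃ k', k = k' + 1 := ⟨k - 1, by omega⟩
              have hkl' : k' < z.length := by simpa using hkl
              refine ⟨k', by omega, hkl', ?_⟩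
              simpa using hPk
            · rintro ⟨k, hk, hkl, hPk⟩
              have hmem1 : i + 1 ∈ (0 : Int) :: t := by
                refine (hmem (i + 1)).2 ⟨k + 1, by omega, by simpa using Nat.succ_lt_succ hkl, ?_⟩
                simpa using hPk
              have : i + 1 ∈ t := by
                rcases List.mem_cons.1 hmem1 with h | h
                · omega
                · exact h
              exact List.mem_map.2 ⟨i + 1, this, by omega⟩
          · intro k hk
            have := hg (k + 1) (by simpa using Nat.succ_lt_succ hk)
            push_cast at this
            simpa using this
        have hmm : (t.map (· - 1)).map (fun i => g (i + 1)) = t.map g := by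
          rw [List.map_map]
          apply List.map_congr_left
          intro x _
          simp
        calc ((0 : Int) :: t).map g = g 0 :: t.map g := by simp
          _ = a :: z.filter P := by rw [hga, ← hmm, ht]
          _ = (a :: z).filter P := by simp [hPa]
    · -- 0 is not in idxs; every index is ≥ 1
      have h0 : (0 : Int) ∉ idxs := by
        intro h
        rcases (hmem 0).1 h with ⟨k, hk, hkl, hPk⟩
        have : k = 0 := by omega
        subst this
        simp at hPk
        exact hPa (by simpa using hPk)
      have hpos : ∀ x ∈ idxs, 0 < x := by
        intro x hx
        rcases (hmem x).1 hx with ⟨k, hk, _, hPk⟩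
        rcases Nat.eq_zero_or_pos k with h | h
        · subst h; exfalso; apply h0; rwa [hk] at hx
        · omega
      have ht : (idxs.map (· - 1)).map (fun i => g (i + 1)) = z.filter P := by
        apply ih
        · rw [List.pairwise_map]
          exact hpw.imp (by intro a b hab; omega)
        · intro i
          constructor
          · intro hi
            rcases List.mem_map.1 hi with ⟨j, hj, hji⟩
            have hj1 : i + 1 ∈ idxs := by
              have : j = i + 1 := by omega
              rwa [this] at hj
            rcases (hmem (i + 1)).1 hj1 with ⟨k, hk, hkl, hPk⟩
            have hkpos : 0 < k := by
              have := hpos _ hj1; omega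
            obtain ⟨k', rfl⟩ : ∃ k', k = k' + 1 := ⟨k - 1, by omega⟩
            have hkl' : k' < z.length := by simpa using hkl
            refine ⟨k', by omega, hkl', ?_⟩
            simpa using hPk
          · rintro ⟨k, hk, hkl, hPk⟩
            have hmem1 : i + 1 ∈ idxs := by
              refine (hmem (i + 1)).2 ⟨k + 1, by omega, by simpa using Nat.succ_lt_succ hkl, ?_⟩
              simpa using hPk
            exact List.mem_map.2 ⟨i + 1, hmem1, by omega⟩
        · intro k hk
          have := hg (k + 1) (by simpa using Nat.succ_lt_succ hk)
          push_cast at this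
          simpa using this
      have hmm : (idxs.map (· - 1)).map (fun i => g (i + 1)) = idxs.map g := by
        rw [List.map_map]
        apply List.map_congr_left
        intro x _
        simp
      rw [← hmm, ht]
      simp [hPa]

-- A's inner loop over zip(times, shares): append-if as a filter+map on each component
lemma inner_A (p : Int × Int) :
    ∀ (z : List (Int × Int)) (st : List Int × List Int),
      z.foldl (fun st ts => if p.1 ≤ ts.1 ∧ ts.1 < p.2 then (st.1 ++ [ts.2], st.2 ++ [ts.1]) else st) st
        = (st.1 ++ (z.filter (fun e => decide (p.1 ≤ e.1 ∧ e.1 < p.2))).map Prod.snd,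
           st.2 ++ (z.filter (fun e => decide (p.1 ≤ e.1 ∧ e.1 < p.2))).map Prod.fst) := by
  intro z
  induction z with
  | nil => intro st; simp
  | cons e z ih =>
    intro st
    by_cases h : p.1 ≤ e.1 ∧ e.1 < p.2 <;>
      simp [h, ih, List.append_assoc]

-- B's inner loop over the selected indices: plain append as a map on each component
lemma inner_B (T S : List Int) :
    ∀ (sel : List Int) (st : List Int × List Int),
      sel.foldl (fun st i => (st.1 ++ [PySem.List.pyGetD S i 0], st.2 ++ [PySem.List.pyGetD T i 0])) st
        = (st.1 ++ sel.map (fun i => PySem.List.pyGetD S i 0),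
           st.2 ++ sel.map (fun i => PySem.List.pyGetD T i 0)) := by
  intro sel
  induction sel with
  | nil => intro st; simp
  | cons i sel ih => intro st; simp [ih, List.append_assoc]

-- the heart of the equivalence: for one period (a, b), B's sorted bisected index slice,
-- read back through the lists, is exactly A's filter of zip(times, shares)
lemma per_period (T S : List Int) (a b : Int) (n : Nat) (key : Int → Int) (order ts : List Int)
    (hn : n = min T.length S.length)
    (hkey : key = fun i => PySem.List.pyGetD T i 0)
    (horder : order = PySem.List.sorted (PySem.List.pyRange 0 (n : Int)) key)
    (hts : ts = order.map key) :
    (PySem.List.sorted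
        (PySem.List.slice order (some ((pvBisectLeft ts a : Nat) : Int))
          (some ((pvBisectLeft ts b : Nat) : Int)))
        (fun i => i)).map (fun i => (PySem.List.pyGetD T i 0, PySem.List.pyGetD S i 0))
      = (T.zip S).filter (fun e => decide (a ≤ e.1 ∧ e.1 < b)) := by
  have hzlen : (T.zip S).length = n := by simp [hn]
  have hmem_order : ∀ i : Int, i ∈ order ↔ 0 ≤ i ∧ i < (n : Int) := by
    intro i
    rw [horder, PySem.List.mem_sorted]
    exact PySem.List.mem_pyRange_one
  have hnodup_order : order.Nodup := by
    rw [horder]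
    exact (PySem.List.sorted_perm _ _ _).nodup_iff.2 (PySem.List.nodup_pyRange_one 0 (n : Int))
  have hlen_ts : ts.length = order.length := by rw [hts]; simp
  have hts_sorted : List.Pairwise (· ≤ ·) ts := by
    rw [hts, horder]
    exact PySem.List.sorted_map_key_pairwise _ key
  have hts_get : ∀ (j : Nat) (hj : j < order.length), ts[j]'(by omega) = key (order[j]'hj) := by
    intro j hj
    simp [hts]
  -- key i is the time at index i, for indices in range
  have hkey_get : ∀ (k : Nat) (hk : k < n), key ((k : Nat) : Int) = T[k]'(by omega) := by
    intro k hk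
    rw [hkey]
    simp only [PySem.List.pyGetD_natCast]
    exact List.getD_eq_getElem T 0 (by omega)
  obtain ⟨hla_le, hla_lt, hla_ge⟩ := pvBisectLeft_spec ts a hts_sorted
  obtain ⟨hlb_le, hlb_lt, hlb_ge⟩ := pvBisectLeft_spec ts b hts_sorted
  rw [PySem.List.slice_natCast]
  set la := pvBisectLeft ts a with hla
  set lb := pvBisectLeft ts b with hlb
  set sl := List.take (lb - la) (List.drop la order) with hsl
  -- membership in the bisected slice = the period condition
  have hmem_slice : ∀ i : Int, i ∈ sl ↔ (i ∈ order ∧ a ≤ key i ∧ key i < b) := by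
    intro i
    constructor
    · intro hi
      rcases List.mem_iff_getElem.1 hi with ⟨kk, hkk, hEq⟩
      have hkk' : kk < lb - la ∧ la + kk < order.length := by
        have h1 := hkk
        simp only [hsl, List.length_take, List.length_drop] at h1
        omega
      have hEq' : order[la + kk]'(hkk'.2) = i := by
        rw [← hEq]
        simp only [hsl, List.getElem_take, List.getElem_drop]
      have hidx : la + kk < order.length := hkk'.2
      have hidx' : la + kk < ts.length := by omega
      have h1 : a ≤ ts[la + kk]'hidx' := hla_ge (la + kk) hidx' (by omega)
      have h2 : ts[la + kk]'hidx' < b := hlb_lt (la + kk) hidx' (by omega)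
      rw [hts_get (la + kk) hidx, hEq'] at h1 h2
      exact ⟨hEq' ▸ List.getElem_mem hidx, h1, h2⟩
    · rintro ⟨hio, hab⟩
      rcases List.mem_iff_getElem.1 hio with ⟨j, hj, hji⟩
      have hj' : j < ts.length := by omega
      have hkeyj : ts[j]'hj' = key i := by rw [hts_get j hj, hji]
      have hjla : la ≤ j := by
        by_contra hc
        have := hla_lt j hj' (by omega)
        rw [hkeyj] at this
        omega
      have hjlb : j < lb := by
        by_contra hc
        have := hlb_ge j hj' (by omega)
        rw [hkeyj] at this
        omega
      apply List.mem_iff_getElem.2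
      refine ⟨j - la, ?_, ?_⟩
      · simp only [hsl, List.length_take, List.length_drop]
        omega
      · simp only [hsl, List.getElem_take, List.getElem_drop]
        simp only [Nat.add_sub_cancel' hjla]
        exact hji
  have hsl_nodup : sl.Nodup := by
    rw [hsl]
    exact ((List.drop_sublist la order).nodup hnodup_order).sublist (List.take_sublist _ _)
  set sel := PySem.List.sorted sl (fun i => i) with hselDef
  have hsel_nodup : sel.Nodup := (PySem.List.sorted_perm sl (fun i => i) false).nodup_iff.2 hsl_nodup
  have hsel_le : List.Pairwise (· ≤ ·) sel := by
    have := PySem.List.sorted_pairwise sl (fun i => i)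
    simpa using this
  have hsel_lt : List.Pairwise (· < ·) sel :=
    (hsel_le.and hsel_nodup).imp (fun h => lt_of_le_of_ne h.1 h.2)
  apply map_idxs_eq_filter
  · exact hsel_lt
  · intro i
    rw [hselDef, PySem.List.mem_sorted, hmem_slice i, hmem_order i]
    constructor
    · rintro ⟨⟨h0, hn'⟩, hab⟩
      refine ⟨i.toNat, by omega, by omega, ?_⟩
      have hkeq : key i = T[i.toNat]'(by omega) := by
        have := hkey_get i.toNat (by omega)
        rwa [show ((i.toNat : Nat) : Int) = i by omega] at this
      rw [List.getElem_zip]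
      simp only [decide_eq_true_eq]
      rw [← hkeq]
      exact hab
    · rintro ⟨k, rfl, hkl, hPk⟩
      rw [List.getElem_zip] at hPk
      simp only [decide_eq_true_eq] at hPk
      have hkeq := hkey_get k (by omega)
      refine ⟨⟨by omega, by omega⟩, ?_⟩
      rw [hkeq]
      exact hPk
  · intro k hk
    rw [List.getElem_zip]
    have h1 : PySem.List.pyGetD T ((k : Nat) : Int) 0 = T[k]'(by omega) := by
      rw [PySem.List.pyGetD_natCast]
      exact List.getD_eq_getElem T 0 (by omega)
    have h2 : PySem.List.pyGetD S ((k : Nat) : Int) 0 = S[k]'(by omega) := by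
      rw [PySem.List.pyGetD_natCast]
      exact List.getD_eq_getElem S 0 (by omega)
    rw [h1, h2]

-- both programs in flatMap form, componentwise equal per period
lemma main_eq (period : List (Int × Int)) (T S : List Int) :
    get_period_share period T S = get_period_share_alt period T S := by
  unfold get_period_share get_period_share_alt
  rw [foldl_pair_append
        (fun p => ((T.zip S).filter (fun e => decide (p.1 ≤ e.1 ∧ e.1 < p.2))).map Prod.snd)
        (fun p => ((T.zip S).filter (fun e => decide (p.1 ≤ e.1 ∧ e.1 < p.2))).map Prod.fst)
        _ (fun st p => inner_A p (T.zip S) st) period ([], [])]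
  rw [foldl_pair_append
        (fun p => (PySem.List.sorted
            (PySem.List.slice
              (PySem.List.sorted (PySem.List.pyRange 0 ((min T.length S.length : Nat) : Int)) (fun i => PySem.List.pyGetD T i 0))
              (some ((pvBisectLeft ((PySem.List.sorted (PySem.List.pyRange 0 ((min T.length S.length : Nat) : Int)) (fun i => PySem.List.pyGetD T i 0)).map (fun i => PySem.List.pyGetD T i 0)) p.1 : Nat) : Int))
              (some ((pvBisectLeft ((PySem.List.sorted (PySem.List.pyRange 0 ((min T.length S.length : Nat) : Int)) (fun i => PySem.List.pyGetD T i 0)).map (fun i => PySem.List.pyGetD T i 0)) p.2 : Nat) : Int)))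
            (fun i => i)).map (fun i => PySem.List.pyGetD S i 0))
        (fun p => (PySem.List.sorted
            (PySem.List.slice
              (PySem.List.sorted (PySem.List.pyRange 0 ((min T.length S.length : Nat) : Int)) (fun i => PySem.List.pyGetD T i 0))
              (some ((pvBisectLeft ((PySem.List.sorted (PySem.List.pyRange 0 ((min T.length S.length : Nat) : Int)) (fun i => PySem.List.pyGetD T i 0)).map (fun i => PySem.List.pyGetD T i 0)) p.1 : Nat) : Int))
              (some ((pvBisectLeft ((PySem.List.sorted (PySem.List.pyRange 0 ((min T.length S.length : Nat) : Int)) (fun i => PySem.List.pyGetD T i 0)).map (fun i => PySem.List.pyGetD T i 0)) p.2 : Nat) : Int)))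
            (fun i => i)).map (fun i => PySem.List.pyGetD T i 0))
        _ (fun st p => inner_B T S _ st) period ([], [])]
  have hpp : ∀ p : Int × Int,
      (PySem.List.sorted
          (PySem.List.slice
            (PySem.List.sorted (PySem.List.pyRange 0 ((min T.length S.length : Nat) : Int)) (fun i => PySem.List.pyGetD T i 0))
            (some ((pvBisectLeft ((PySem.List.sorted (PySem.List.pyRange 0 ((min T.length S.length : Nat) : Int)) (fun i => PySem.List.pyGetD T i 0)).map (fun i => PySem.List.pyGetD T i 0)) p.1 : Nat) : Int))
            (some ((pvBisectLeft ((PySem.List.sorted (PySem.List.pyRange 0 ((min T.length S.length : Nat) : Int)) (fun i => PySem.List.pyGetD T i 0)).map (fun i => PySem.List.pyGetD T i 0)) p.2 : Nat) : Int)))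
          (fun i => i)).map (fun i => (PySem.List.pyGetD T i 0, PySem.List.pyGetD S i 0))
        = (T.zip S).filter (fun e => decide (p.1 ≤ e.1 ∧ e.1 < p.2)) := by
    intro p
    exact per_period T S p.1 p.2 (min T.length S.length) _ _ _ rfl rfl rfl rfl
  refine Prod.ext ?_ ?_ <;> simp only [List.nil_append]
  · apply List.flatMap_congr
    intro p _
    rw [← hpp p, List.map_map]
    rfl
  · apply List.flatMap_congr
    intro p _
    rw [← hpp p, List.map_map]
    rfl

-- ===== VERDICT (by name: the statement is the Claim_ definition above) =====
theorem get_period_share_spec : Claim_equal_get_period_share := by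
  intro period T S _
  exact main_eq period T S
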